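-- pv_equiv track=rewrite | github.com/alexli2222/Eficiency | modules/linalg.py | _sqrt_factor
-- ===== SOURCE A (Python) =====
-- def _sqrt_factor(n: int) -> tuple:
--     """Return (a, b) where n = a²·b, b square-free. Assumes n ≤ 10000."""
--     a, i = 1, 2
--     while i * i <= n:
--         while n % (i * i) == 0:
--             a *= i
--             n //= (i * i)
--         i += 1
--     return a, n
-- ===== SOURCE B (Python) =====
-- def _sqrt_factor(n: int) -> tuple:
--     """Return (a, b) where n = a**2 * b, b square-free.
--
--     Different algorithm from trial-division square-stripping: directly
--     search for the LARGEST a with a*a dividing n (scan a = 1, 2, ... up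
--     to sqrt(n), remembering the last square divisor found), then b is
--     the exact cofactor n // a**2.
--     """
--     best, a = 1, 1
--     while a * a <= n:
--         if n % (a * a) == 0:
--             best = a
--         a += 1
--     return best, n // (best * best)
-- ===== Notes on version B (the rewrite author's own statement) =====
-- stated objective: alternative
-- what changed: Instead of stripping one prime square at a time while mutating n, B scans a = 1..sqrt(n) for the largest a with a*a | n (the maximal square divisor) and returns (a, n // a**2), never dividing n during the loop.
import Mathlib
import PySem

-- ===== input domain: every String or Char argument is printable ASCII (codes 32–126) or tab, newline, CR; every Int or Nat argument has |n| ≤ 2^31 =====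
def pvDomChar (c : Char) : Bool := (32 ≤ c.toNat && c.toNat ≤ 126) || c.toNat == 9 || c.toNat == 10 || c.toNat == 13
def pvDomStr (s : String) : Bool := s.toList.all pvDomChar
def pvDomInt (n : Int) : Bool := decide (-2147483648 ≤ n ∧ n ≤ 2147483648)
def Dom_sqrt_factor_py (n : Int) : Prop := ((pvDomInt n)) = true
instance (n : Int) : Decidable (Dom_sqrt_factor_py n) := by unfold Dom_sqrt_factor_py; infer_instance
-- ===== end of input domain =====

-- B replaces A's one-square-at-a-time stripping loop by a direct scan for the largest a
-- with a*a | n, returning (a, n // a**2); an alternative algorithm of the same cost.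

-- ===== PORT A =====
-- inner 'while n % (i*i) == 0: a *= i; n //= (i*i)'; fuel is only a totality guard
def sqrtFactorInnerA (fuel : Nat) (i a n : Int) : Int × Int :=
  match fuel with
  | 0 => (a, n)
  | f + 1 =>
    if PySem.Int.mod n (i * i) = 0 then
      sqrtFactorInnerA f i (a * i) (PySem.Int.floordiv n (i * i))
    else (a, n)

-- outer 'while i*i <= n: <inner>; i += 1'; fuel is only a totality guard
def sqrtFactorOuterA (fuel : Nat) (i a n : Int) : Int × Int :=
  match fuel with
  | 0 => (a, n)
  | f + 1 =>
    if i * i ≤ n then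
      match sqrtFactorInnerA (n.toNat + 1) i a n with
      | (a', n') => sqrtFactorOuterA f (i + 1) a' n'
    else (a, n)

def sqrt_factor_py (n : Int) : Int × Int := sqrtFactorOuterA (n.toNat + 1) 2 1 n

-- ===== PORT B =====
-- 'while a*a <= n: if n % (a*a) == 0: best = a; a += 1'; fuel is only a totality guard
def bestSquareLoop (fuel : Nat) (best a n : Int) : Int :=
  match fuel with
  | 0 => best
  | f + 1 =>
    if a * a ≤ n then
      bestSquareLoop f (if PySem.Int.mod n (a * a) = 0 then a else best) (a + 1) n
    else best

def sqrt_factor_py_alt (n : Int) : Int × Int :=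
  let best := bestSquareLoop (n.toNat + 1) 1 1 n
  (best, PySem.Int.floordiv n (best * best))

-- ===== PRECONDITION & SPEC =====
def Spec_sqrt_factor_py (n : Int) (out : Int × Int) : Prop := out = sqrt_factor_py_alt n
instance (n : Int) (out : Int × Int) : Decidable (Spec_sqrt_factor_py n out) := by unfold Spec_sqrt_factor_py; infer_instance

-- ===== CLAIM (what is proved, stated in full; the proofs are below) =====
def Claim_equal_sqrt_factor_py : Prop := ∀ (n : Int), Dom_sqrt_factor_py n → Spec_sqrt_factor_py n (sqrt_factor_py n)

-- ===== LEMMAS AND PROOFS =====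

-- A's inner loop: preserves a*a*n, keeps n positive and a divisor of the old n,
-- and ends with i*i no longer dividing n.
theorem sqrtFactorInnerA_spec (fuel : Nat) :
    ∀ (i a n : Int), 2 ≤ i → 1 ≤ a → 1 ≤ n → n.toNat ≤ fuel →
    ∃ a' n', sqrtFactorInnerA fuel i a n = (a', n') ∧
      a' * a' * n' = a * a * n ∧ 1 ≤ a' ∧ 1 ≤ n' ∧ n' ∣ n ∧ ¬ (i * i ∣ n') := by
  induction fuel with
  | zero =>
    intro i a n hi ha hn hf
    omega
  | succ f ih =>
    intro i a n hi ha hn hf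
    have hii : (0:Int) < i * i := by nlinarith
    unfold sqrtFactorInnerA
    by_cases hdvd : PySem.Int.mod n (i * i) = 0
    · rw [if_pos hdvd]
      have hdvd' : i * i ∣ n := (PySem.Int.mod_eq_zero_iff_dvd n (i * i)).mp hdvd
      obtain ⟨m, hm⟩ := hdvd'
      have hfd : PySem.Int.floordiv n (i * i) = n / (i * i) :=
        PySem.Int.floordiv_eq_ediv_of_pos hii
      have hq : n / (i * i) = m := by rw [hm]; exact Int.mul_ediv_cancel_left m (by positivity)
      have hm1 : 1 ≤ m := by nlinarith
      have hi4 : (4:Int) ≤ i * i := by nlinarith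
      have hmn : m < n := by nlinarith
      have hmf : m.toNat ≤ f := by omega
      obtain ⟨a', n', heq, hval, ha', hn', hdvd2, hnd⟩ :=
        ih i (a * i) m hi (by nlinarith) hm1 hmf
      refine ⟨a', n', ?_, ?_, ha', hn', ?_, hnd⟩
      · rw [hfd, hq]; exact heq
      · rw [hval, hm]; ring
      · exact hdvd2.trans ⟨i * i, by linarith [hm]⟩
    · rw [if_neg hdvd]
      exact ⟨a, n, rfl, rfl, ha, hn, dvd_rfl,
        fun h => hdvd ((PySem.Int.mod_eq_zero_iff_dvd n (i * i)).mpr h)⟩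

-- A's outer loop: the result (a', n') satisfies a'*a'*n' = a*a*n with n' having
-- no square divisor j*j (j ≥ 2), given enough fuel and the history invariant.
theorem sqrtFactorOuterA_spec (fuel : Nat) :
    ∀ (i a n : Int), 2 ≤ i → 1 ≤ a → 1 ≤ n → n.toNat + 2 ≤ fuel + i.toNat →
    (∀ j : Int, 2 ≤ j → j < i → ¬ (j * j ∣ n)) →
    ∃ a' n', sqrtFactorOuterA fuel i a n = (a', n') ∧
      a' * a' * n' = a * a * n ∧ 1 ≤ a' ∧ 1 ≤ n' ∧
      (∀ j : Int, 2 ≤ j → ¬ (j * j ∣ n')) := by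
  induction fuel with
  | zero =>
    intro i a n hi ha hn hf hinv
    have hni : n < i := by omega
    refine ⟨a, n, rfl, rfl, ha, hn, ?_⟩
    intro j hj hdvd
    by_cases hji : j < i
    · exact hinv j hj hji hdvd
    · have : j * j ≤ n := Int.le_of_dvd (by omega) hdvd
      nlinarith
  | succ f ih =>
    intro i a n hi ha hn hf hinv
    unfold sqrtFactorOuterA
    by_cases hcond : i * i ≤ n
    · rw [if_pos hcond]
      obtain ⟨a1, n1, heq1, hval1, ha1, hn1, hdvd1, hnd1⟩ :=
        sqrtFactorInnerA_spec (n.toNat + 1) i a n hi ha hn (by omega)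
      rw [heq1]
      have hn1n : n1 ≤ n := Int.le_of_dvd (by omega) hdvd1
      obtain ⟨a', n', heq, hval, ha', hn', hsf⟩ :=
        ih (i + 1) a1 n1 (by omega) ha1 hn1 (by omega)
          (fun j hj hji hd => by
            by_cases hji' : j < i
            · exact hinv j hj hji' (hd.trans hdvd1)
            · have : j = i := by omega
              exact hnd1 (this ▸ hd))
      exact ⟨a', n', heq, by rw [hval, hval1], ha', hn', hsf⟩
    · rw [if_neg hcond]
      refine ⟨a, n, rfl, rfl, ha, hn, ?_⟩
      intro j hj hdvd
      by_cases hji : j < i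
      · exact hinv j hj hji hdvd
      · have h1 : j * j ≤ n := Int.le_of_dvd (by omega) hdvd
        nlinarith

-- B's loop: returns the largest b with b*b ∣ n, given the running-maximum invariant.
theorem bestSquareLoop_spec (fuel : Nat) :
    ∀ (best a n : Int), 1 ≤ best → 1 ≤ a → 1 ≤ n → best * best ∣ n →
    n.toNat + 2 ≤ fuel + a.toNat →
    (∀ c : Int, 1 ≤ c → c < a → c * c ∣ n → c ≤ best) →
    1 ≤ bestSquareLoop fuel best a n ∧
    (bestSquareLoop fuel best a n) * (bestSquareLoop fuel best a n) ∣ n ∧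
    (∀ c : Int, 1 ≤ c → c * c ∣ n → c ≤ bestSquareLoop fuel best a n) := by
  induction fuel with
  | zero =>
    intro best a n hb ha hn hdvd hf hinv
    have hna : n < a := by omega
    unfold bestSquareLoop
    refine ⟨hb, hdvd, fun c hc hcd => ?_⟩
    have : c * c ≤ n := Int.le_of_dvd (by omega) hcd
    exact hinv c hc (by nlinarith) hcd
  | succ f ih =>
    intro best a n hb ha hn hdvd hf hinv
    unfold bestSquareLoop
    by_cases hcond : a * a ≤ n
    · rw [if_pos hcond]
      by_cases hm : PySem.Int.mod n (a * a) = 0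
      · rw [if_pos hm]
        have hd : a * a ∣ n := (PySem.Int.mod_eq_zero_iff_dvd n (a * a)).mp hm
        exact ih a (a + 1) n ha (by omega) hn hd (by omega)
          (fun c hc hca hcd => by omega)
      · rw [if_neg hm]
        exact ih best (a + 1) n hb (by omega) hn hdvd (by omega)
          (fun c hc hca hcd => by
            by_cases h : c < a
            · exact hinv c hc h hcd
            · have : c = a := by omega
              exact absurd ((PySem.Int.mod_eq_zero_iff_dvd n (a * a)).mpr (this ▸ hcd)) hm)
    · rw [if_neg hcond]
      refine ⟨hb, hdvd, fun c hc hcd => ?_⟩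
      have h1 : c * c ≤ n := Int.le_of_dvd (by omega) hcd
      have : c < a := by nlinarith
      exact hinv c hc this hcd

-- Number theory: if m is (Nat-)squarefree and c² ∣ a²·m then c ∣ a.
theorem dvd_of_sq_dvd_sq_mul_squarefree (c a m : Nat) (ha : a ≠ 0) (hm : m ≠ 0)
    (hsf : Squarefree m) (hd : c * c ∣ a * a * m) : c ∣ a := by
  have hc : c ≠ 0 := by
    intro h
    subst h
    have : a * a * m = 0 := Nat.eq_zero_of_zero_dvd (by simpa using hd)
    simp [ha, hm] at this
  have hle := (Nat.factorization_le_iff_dvd (Nat.mul_ne_zero hc hc)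
    (Nat.mul_ne_zero (Nat.mul_ne_zero ha ha) hm)).mpr hd
  rw [← Nat.factorization_le_iff_dvd hc ha]
  intro p
  have h1 := hle p
  rw [Nat.factorization_mul hc hc, Nat.factorization_mul (Nat.mul_ne_zero ha ha) hm,
    Nat.factorization_mul ha ha] at h1
  have h2 : m.factorization p ≤ 1 :=
    ((Nat.squarefree_iff_factorization_le_one hm).mp hsf) p
  simp only [Finsupp.add_apply] at h1
  omega

-- Int version: n' ≥ 1 with no square divisor j*j (j ≥ 2), c² ∣ a²·n' ⇒ c ≤ a.
theorem le_of_sq_dvd_int (c a m : Int) (hc : 1 ≤ c) (ha : 1 ≤ a) (hm : 1 ≤ m)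
    (hsf : ∀ j : Int, 2 ≤ j → ¬ (j * j ∣ m)) (hd : c * c ∣ a * a * m) : c ≤ a := by
  have hcn : c = (c.toNat : Int) := by omega
  have han : a = (a.toNat : Int) := by omega
  have hmn : m = (m.toNat : Int) := by omega
  have hsfn : Squarefree m.toNat := by
    intro x hx
    match x with
    | 0 =>
      exfalso
      have : m.toNat = 0 := Nat.eq_zero_of_zero_dvd (by simpa using hx)
      omega
    | 1 => exact isUnit_one
    | (y + 2) =>
      exfalso
      apply hsf ((y + 2 : Nat) : Int) (by exact_mod_cast Nat.le_add_left 2 y)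
      rw [hmn]
      exact_mod_cast hx
  have hdn : c.toNat * c.toNat ∣ a.toNat * a.toNat * m.toNat := by
    rw [← Int.natCast_dvd_natCast]
    push_cast
    rw [← hcn, ← han, ← hmn]
    exact hd
  have := dvd_of_sq_dvd_sq_mul_squarefree c.toNat a.toNat m.toNat
    (by omega) (by omega) hsfn hdn
  have := Nat.le_of_dvd (by omega) this
  omega

-- ===== VERDICT (by name: the statement is the Claim_ definition above) =====
theorem sqrt_factor_py_spec : Claim_equal_sqrt_factor_py := by
  intro n _
  unfold Spec_sqrt_factor_py sqrt_factor_py sqrt_factor_py_alt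
  by_cases hn : 1 ≤ n
  · obtain ⟨a', n', heqA, hval, ha', hn', hsf⟩ :=
      sqrtFactorOuterA_spec (n.toNat + 1) 2 1 n (by omega) (by omega) hn
        (by omega) (by intro j hj hji; omega)
    obtain ⟨hb1, hbd, hbmax⟩ :=
      bestSquareLoop_spec (n.toNat + 1) 1 1 n (by omega) (by omega) hn
        (one_dvd n) (by omega) (by intro c hc hca; omega)
    set b := bestSquareLoop (n.toNat + 1) 1 1 n with hbdef
    have hval' : a' * a' * n' = n := by rw [hval]; ring
    have hadvd : a' * a' ∣ n := hval' ▸ Dvd.intro n' rfl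
    have h1 : a' ≤ b := hbmax a' ha' hadvd
    have h2 : b ≤ a' := le_of_sq_dvd_int b a' n' hb1 ha' hn' hsf (hval' ▸ hbd)
    have hab : b = a' := le_antisymm h2 h1
    rw [heqA]
    simp only [hab]
    have hpos : (0:Int) < a' * a' := by nlinarith
    have hfd2 : PySem.Int.floordiv n (a' * a') = n' := by
      rw [PySem.Int.floordiv_eq_ediv_of_pos hpos, ← hval']
      exact Int.mul_ediv_cancel_left n' (ne_of_gt hpos)
    rw [hfd2]
  · -- n ≤ 0: neither loop runs; A returns (1, n), B returns (1, n // 1) = (1, n)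
    have h0 : n.toNat = 0 := by omega
    rw [h0]
    unfold sqrtFactorOuterA bestSquareLoop
    rw [if_neg (by nlinarith : ¬ (2 * 2 : Int) ≤ n), if_neg (by omega : ¬ (1 * 1 : Int) ≤ n)]
    have h1 : PySem.Int.floordiv n (1 * 1) = n := by
      rw [PySem.Int.floordiv_eq_ediv_of_pos (by norm_num)]
      simp
    show (1, n) = ((1 : Int), PySem.Int.floordiv n ((1 : Int) * 1))
    rw [h1]
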